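/- GENERATED by mk_final_copies.py from the proof of the farm's unit `imdct_step3_inner_r_loop.4` (farm:imdct_step3_inner_r_loop.4.1: Proof.lean) as the
   re-elaboration sweep compiled it — do not edit. -/
import Asan.CheckWalk
import Vorbis.Spec.Units.imdct_step3_inner_r_loop_4
open X86 X86.User Asan Vorbis Vorbis.Spec

set_option maxRecDepth 4000
set_option maxHeartbeats 4000000

/-- Segment 4 of `imdct_step3_inner_r_loop` (`loop1` = 0x105af9, stb_vorbis_fixed.c:2488 `for (i=lim >> 2; i > 0; --i)`:
`test r15d, r15d ; jg cut1` into the body, else the epilogue `add rsp, 28H ; pop rbx ; pop rbp ; pop r12 ; pop r13 ; pop r14 ;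
pop r15 ; ret`, stb_vorbis_fixed.c:2528). The segment STARTS at a cut point (the assertion `AtHead` is opened field by field)
and has TWO exits: the assertion `AtBody` at `cut1` = 0x10576f (rebuilt from the entry assertion's fields: nothing changed but
RIP and the status flags; `t < m` from the branch), and the function's `Returned`, made with `Returned.mk` by hand (`saved`
from the popped slots, `same` and the post from the carried fields). -/
theorem Vorbis.Spec.Worked.imdct_step3_inner_r_loop_4_ok : Vorbis.Spec.imdct_step3_inner_r_loop_4.Statement := by
  intro Lay hLay μ hμ u₀ hcode others frames len i0 koff k1 ue ret t v hv
  -- 1. the assertion at the loop head, field by field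
  obtain ⟨hrip, hbody, hle, hcnt, he0, he2, hA, hk1⟩ := hv
  obtain ⟨he, hpre, hcodeok, habi, hframe, hsame, hshadow⟩ := hbody
  obtain ⟨hrsp, sret, s15, s14, s13, s12, sbp, sbx⟩ := hframe
  -- the ENTRY state's facts (about `ue`)
  have hentry := he
  v_entry he
  -- 2. the PRESENT state's facts under the names the walker reads
  have hdf := habi.1
  have hmx := habi.2
  have hsse : SseOK v := sseOK_of_abiInv habi
  -- 4. the walk: 0x105af9 `test r15d, r15d`, 0x105afc `jg cut1`, then the epilogue to the `ret` at 0x105b10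
  u_walk hcode [hμ.vendor] until [Vorbis.L.imdct_step3_inner_r_loop.cut1] span [Vorbis.L.textLo, Vorbis.L.textHi] side (v_side)
  · -- 5a. the arm into the body (0x10576f, C line 2489): `r15d > 0`, so `t < m`; nothing changed but RIP and the status flags
    refine ReachVia.done (Or.inl ⟨w_rip,
      ⟨⟨hentry, hpre, w_eq, ?_, ⟨?_, ?_, ?_, ?_, ?_, ?_, ?_, ?_⟩, ?_, ?_⟩, hle, ?_, ?_, ?_, ?_, ?_⟩, ?_⟩)
    · -- DF = 0 and the SSE masks
      v_inv
    · -- the steady stack pointer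
      rw [w_kept .rsp rfl]
      exact hrsp
    · -- the return address slot
      rw [w_mem]
      exact sret
    · -- the saved r15
      rw [w_mem]
      exact s15
    · -- the saved r14
      rw [w_mem]
      exact s14
    · -- the saved r13
      rw [w_mem]
      exact s13
    · -- the saved r12
      rw [w_mem]
      exact s12
    · -- the saved rbp
      rw [w_mem]
      exact sbp
    · -- the saved rbx
      rw [w_mem]
      exact sbx
    · -- the footprint so far
      rw [w_mem]
      exact hsame
    · -- no shadow byte written
      rw [w_mem]
      exact hshadow
    · -- `r15d = m − t`
      rw [w_kept .r15 rfl]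
      exact hcnt
    · -- `r12 = e0 − 32 t`
      rw [w_kept .r12 rfl]
      exact he0
    · -- `rbp = e2 − 32 t`
      rw [w_kept .rbp rfl]
      exact he2
    · -- `rbx = A + 16 k1 t`
      rw [w_kept .rbx rfl]
      exact hA
    · -- the spilled `k1`
      rw [w_mem]
      exact hk1
    · -- `t < m` from the branch: r15d ≠ 0
      have h15 := hbr_105afc.1
      rw [Asan.part32_toNat] at h15
      omega
  · -- 5b. the epilogue (C line 2528): the contract's `Returned`
    refine ReachVia.done (Or.inr ?_)
    refine X86.User.Returned.mk w_rip w_rsp ?r_saved ?r_same (Vorbis.conv_code_in w_eq) ?r_inv ?r_post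
    case r_saved =>
      -- the six callee-saved registers were popped back from their slots
      intro r hr
      cases r <;> first
        | exact absurd hr (by decide)
        | (with_reducible assumption)
    case r_same =>
      -- nothing was stored by this segment
      rw [w_mem]
      exact hsame
    case r_inv => v_inv
    case r_post =>
      show ShadowUntouched ue.mem s_105b10.mem
      rw [w_mem]
      exact hshadow
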